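-- pv_equiv track=rewrite | github.com/wq2581/DrugClaw | drugclaw/response_formatter.py | format_source_citations
-- ===== SOURCE A (Python) =====
-- from typing import Any, Dict, List, Optional
--
-- def format_source_citations(
--     retrieved_content: List[Dict[str, Any]],
--     web_results: Optional[List[Dict[str, Any]]] = None,
--     citations: Optional[List[str]] = None,
--     max_items: int = 6,
-- ) -> str:
--     """Collect and deduplicate sources into a numbered citation list."""
--     seen: set[str] = set()
--     sources: List[str] = []
--
--     if citations:
--         for citation in citations:
--             if citation and citation not in seen:
--                 seen.add(citation)
--                 sources.append(citation)
--
--     for item in retrieved_content: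
--         src = item.get("source", "")
--         if src and src not in seen:
--             seen.add(src)
--             sources.append(src)
--
--     if web_results:
--         for item in web_results:
--             title = item.get("title", "")
--             url   = item.get("url", "")
--             label = f"[{title}]({url})" if url else title
--             if label and label not in seen:
--                 seen.add(label)
--                 sources.append(label)
--
--     if not sources:
--         return ""
--
--     lines = ["", "## Sources", ""]
--     displayed_sources = sources[:max_items] if max_items > 0 else sources
--     for i, src in enumerate(displayed_sources, 1):
--         lines.append(f"{i}. {src}")
--     if max_items > 0 and len(sources) > max_items:
--         omitted = len(sources) - max_items
--         lines.extend(
--             [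
--                 "",
--                 f"> *Showing {max_items} of {len(sources)} sources; {omitted} more omitted.*",
--             ]
--         )
--     lines.append("")
--     return "\n".join(lines)
-- ===== SOURCE B (Python) =====
-- def format_source_citations(retrieved_content, web_results=None, citations=None, max_items=6):
--     """Dedup by an erase-ahead worklist (take the head, delete its later duplicates), no seen-set."""
--     work = [s for s in (citations or []) if s]
--     work += [s for s in (item.get("source", "") for item in retrieved_content) if s]
--     for item in (web_results or []):
--         title = item.get("title", "")
--         url = item.get("url", "")
--         label = f"[{title}]({url})" if url else title
--         if label:
--             work.append(label)
--     sources = []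
--     while work:
--         head = work[0]
--         sources.append(head)
--         work = [y for y in work[1:] if y != head]
--     if not sources:
--         return ""
--     shown = sources[:max_items] if max_items > 0 else sources
--     body = "\n".join(f"{i}. {s}" for i, s in enumerate(shown, 1))
--     note = ""
--     if max_items > 0 and len(sources) > max_items:
--         note = f"\n\n> *Showing {max_items} of {len(sources)} sources; {len(sources) - max_items} more omitted.*"
--     return f"\n## Sources\n\n{body}{note}\n"
-- ===== Notes on version B (the rewrite author's own statement) =====
-- stated objective: alternative
-- what changed: B drops A's seen-set entirely: it gathers the non-empty labels into one worklist and dedups by an erase-ahead loop (take the head, then delete all its later duplicates from the worklist), then formats via a join over a comprehension instead of appending to a lines list; this trades A's O(n) set lookups for worklist rewriting.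
import Mathlib
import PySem

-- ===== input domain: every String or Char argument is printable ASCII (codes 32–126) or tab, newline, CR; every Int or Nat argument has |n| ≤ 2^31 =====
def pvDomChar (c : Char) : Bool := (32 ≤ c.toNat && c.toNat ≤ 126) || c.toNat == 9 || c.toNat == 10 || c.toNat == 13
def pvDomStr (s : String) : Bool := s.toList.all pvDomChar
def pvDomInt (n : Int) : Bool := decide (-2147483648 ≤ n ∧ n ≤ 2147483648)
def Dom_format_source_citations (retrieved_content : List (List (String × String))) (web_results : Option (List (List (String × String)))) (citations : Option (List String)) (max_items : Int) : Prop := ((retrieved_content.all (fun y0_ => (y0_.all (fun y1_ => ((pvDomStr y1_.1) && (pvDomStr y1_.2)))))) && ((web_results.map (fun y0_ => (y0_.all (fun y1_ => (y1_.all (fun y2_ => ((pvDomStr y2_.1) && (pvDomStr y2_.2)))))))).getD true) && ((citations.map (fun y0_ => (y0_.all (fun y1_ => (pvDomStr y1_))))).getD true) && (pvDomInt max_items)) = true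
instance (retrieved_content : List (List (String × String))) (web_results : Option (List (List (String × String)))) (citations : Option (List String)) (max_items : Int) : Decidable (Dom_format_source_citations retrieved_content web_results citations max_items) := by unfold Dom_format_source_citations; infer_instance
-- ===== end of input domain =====

-- B dedups with an erase-ahead worklist (take the head, delete its later duplicates) instead of
-- A's seen-set threaded through three filtering append loops; same output, stated as 'alternative'.

-- ===== PORT A =====
-- A's per-label step: 'if label and label not in seen: seen.add(label); sources.append(label)'
def fscStep (st : PySem.Set String × List String) (s : String) : PySem.Set String × List String :=
  if s != "" && !(PySem.Set.contains st.1 s) then (PySem.Set.add st.1 s, st.2 ++ [s]) else st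

def format_source_citations (retrieved_content : List (List (String × String))) (web_results : Option (List (List (String × String)))) (citations : Option (List String)) (max_items : Int) : String :=
  let st0 : PySem.Set String × List String := (PySem.Set.empty, [])
  let st1 := (citations.getD []).foldl fscStep st0
  let st2 := retrieved_content.foldl (fun st item => fscStep st (PySem.Dict.getD (PySem.Dict.mk item) "source" "")) st1
  let st3 := (web_results.getD []).foldl (fun st item =>
      let title := PySem.Dict.getD (PySem.Dict.mk item) "title" ""
      let url := PySem.Dict.getD (PySem.Dict.mk item) "url" ""
      let label := if url != "" then "[" ++ title ++ "](" ++ url ++ ")" else title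
      fscStep st label) st2
  let sources := st3.2
  if sources = [] then ""
  else
    let displayed := if max_items > 0 then PySem.List.slice sources none (some max_items) else sources
    let lines := (["", "## Sources", ""] : List String)
    let lines := (PySem.List.enumerate displayed 1).foldl
        (fun ls p => ls ++ [PySem.Int.toStr p.1 ++ ". " ++ p.2]) lines
    let lines := if max_items > 0 ∧ (sources.length : Int) > max_items then
        lines ++ ["", "> *Showing " ++ (PySem.Int.toStr max_items ++ " of " ++ PySem.Int.toStr (sources.length : Int) ++ " sources; " ++ PySem.Int.toStr ((sources.length : Int) - max_items) ++ " more omitted.*")]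
      else lines
    PySem.Str.join "\n" (lines ++ [""])

-- ===== PORT B =====
-- B's web-result label
def fscLabel (item : List (String × String)) : String :=
  let title := PySem.Dict.getD (PySem.Dict.mk item) "title" ""
  let url := PySem.Dict.getD (PySem.Dict.mk item) "url" ""
  if url != "" then "[" ++ title ++ "](" ++ url ++ ")" else title

-- B's 'while work: head = work[0]; sources.append(head); work = [y for y in work[1:] if y != head]'
def nubLoop (sources : List String) (work : List String) : List String :=
  match work with
  | [] => sources
  | head :: rest => nubLoop (sources ++ [head]) (rest.filter (fun y => y != head))
termination_by work.length
decreasing_by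
  simp only [List.length_cons, List.length_unattach]
  exact Nat.lt_succ_of_le (le_trans (List.length_filter_le _ _) (by simp))

def format_source_citations_alt (retrieved_content : List (List (String × String))) (web_results : Option (List (List (String × String)))) (citations : Option (List String)) (max_items : Int) : String :=
  let work := (citations.getD []).filter (fun s => s != "")
      ++ (retrieved_content.map (fun item => PySem.Dict.getD (PySem.Dict.mk item) "source" "")).filter (fun s => s != "")
  let work := (web_results.getD []).foldl (fun acc item =>
      if fscLabel item != "" then acc ++ [fscLabel item] else acc) work
  let sources := nubLoop [] work
  if sources = [] then ""
  else
    let shown := if max_items > 0 then PySem.List.slice sources none (some max_items) else sources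
    let body := PySem.Str.join "\n" ((PySem.List.enumerate shown 1).map (fun p => PySem.Int.toStr p.1 ++ ". " ++ p.2))
    let note := if max_items > 0 ∧ (sources.length : Int) > max_items then
        "\n\n> *Showing " ++ (PySem.Int.toStr max_items ++ " of " ++ PySem.Int.toStr (sources.length : Int) ++ " sources; " ++ PySem.Int.toStr ((sources.length : Int) - max_items) ++ " more omitted.*")
      else ""
    "\n## Sources\n\n" ++ body ++ note ++ "\n"

-- ===== PRECONDITION & SPEC =====
def Spec_format_source_citations (retrieved_content : List (List (String × String))) (web_results : Option (List (List (String × String)))) (citations : Option (List String)) (max_items : Int) (out : String) : Prop := out = format_source_citations_alt retrieved_content web_results citations max_items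
instance (retrieved_content : List (List (String × String))) (web_results : Option (List (List (String × String)))) (citations : Option (List String)) (max_items : Int) (out : String) : Decidable (Spec_format_source_citations retrieved_content web_results citations max_items out) := by unfold Spec_format_source_citations; infer_instance

-- ===== CLAIM (what is proved, stated in full; the proofs are below) =====
def Claim_equal_format_source_citations : Prop := ∀ (retrieved_content : List (List (String × String))) (web_results : Option (List (List (String × String)))) (citations : Option (List String)) (max_items : Int), Dom_format_source_citations retrieved_content web_results citations max_items → Spec_format_source_citations retrieved_content web_results citations max_items (format_source_citations retrieved_content web_results citations max_items)

-- ===== LEMMAS AND PROOFS =====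

theorem join_cons_ne (sep x : String) (xs : List String) (h : xs ≠ []) :
    PySem.Str.join sep (x :: xs) = x ++ sep ++ PySem.Str.join sep xs := by
  obtain ⟨y, ys, rfl⟩ := List.exists_cons_of_ne_nil h
  simp [PySem.Str.join, PySem.Chars.join_cons_cons, String.append_assoc]

theorem join_one (sep x : String) : PySem.Str.join sep [x] = x := by
  simp [PySem.Str.join, PySem.Chars.join, List.intercalate]

theorem join_append_ne (sep : String) (xs ys : List String) (hx : xs ≠ []) (hy : ys ≠ []) :
    PySem.Str.join sep (xs ++ ys) = PySem.Str.join sep xs ++ sep ++ PySem.Str.join sep ys := by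
  induction xs with
  | nil => exact absurd rfl hx
  | cons x xs ih =>
    rcases xs with _ | ⟨z, zs⟩
    · simp only [List.nil_append, List.cons_append]
      rw [join_cons_ne sep x ys hy, join_one]
    · rw [List.cons_append, join_cons_ne sep x _ (by simp),
          join_cons_ne sep x (z :: zs) (by simp), ih (by simp)]
      simp [String.append_assoc]

theorem fold_fscStep (xs : List String) : ∀ l : List String,
    xs.foldl fscStep (l, l) =
      ((xs.filter (fun s => s != "")).foldl PySem.Set.add l,
       (xs.filter (fun s => s != "")).foldl PySem.Set.add l) := by
  induction xs with
  | nil => intro l; simp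
  | cons x xs ih =>
    intro l
    by_cases hx : (x != "") = true
    · by_cases hm : x ∈ l
      · simp [List.foldl_cons, fscStep, hx, hm, PySem.Set.contains, PySem.Set.add, ih]
      · simp [List.foldl_cons, fscStep, hx, hm, PySem.Set.contains, PySem.Set.add, ih]
    · simp [List.foldl_cons, fscStep, hx, ih]

theorem shape1 (L : List String) (hn : L ≠ []) :
    PySem.Str.join "\n" ("" :: "## Sources" :: "" :: (L ++ [""])) =
      "\n## Sources\n\n" ++ PySem.Str.join "\n" L ++ "" ++ "\n" := by
  rw [join_cons_ne _ _ _ (by simp), join_cons_ne _ _ _ (by simp), join_cons_ne _ _ _ (by simp),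
      join_append_ne _ L [""] hn (by simp), join_one]
  simp only [String.append_empty, String.empty_append, ← String.append_assoc]
  congr 2

theorem shape2 (L : List String) (note : String) (hn : L ≠ []) :
    PySem.Str.join "\n" ("" :: "## Sources" :: "" :: (L ++ ["", note, ""])) =
      "\n## Sources\n\n" ++ PySem.Str.join "\n" L ++ ("\n\n" ++ note) ++ "\n" := by
  rw [join_cons_ne _ _ _ (by simp), join_cons_ne _ _ _ (by simp), join_cons_ne _ _ _ (by simp),
      join_append_ne _ L ["", note, ""] hn (by simp),
      join_cons_ne _ _ _ (by simp), join_cons_ne _ _ _ (by simp), join_one]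
  simp only [String.append_empty, String.empty_append, ← String.append_assoc]
  congr 2
  rw [show ("\n\n" : String) = "\n" ++ "\n" from rfl]
  simp only [← String.append_assoc]
  congr 3

theorem note_merge (mid : String) : "\n\n" ++ ("> *Showing " ++ mid) = "\n\n> *Showing " ++ mid := by
  rw [← String.append_assoc, show ("\n\n" ++ "> *Showing " : String) = "\n\n> *Showing " from rfl]

theorem sources_eq (retrieved_content : List (List (String × String))) (web_results : Option (List (List (String × String)))) (citations : Option (List String)) :
    (List.foldl (fun st item =>
      fscStep st
        (if ((PySem.Dict.mk item).getD "url" "" != "") = true then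
          "[" ++ (PySem.Dict.mk item).getD "title" "" ++ "](" ++ (PySem.Dict.mk item).getD "url" "" ++ ")"
        else (PySem.Dict.mk item).getD "title" ""))
      (List.foldl (fun st item => fscStep st ((PySem.Dict.mk item).getD "source" ""))
        (List.foldl fscStep (PySem.Set.empty, ([] : List String)) (citations.getD [])) retrieved_content)
      (web_results.getD [])).2
    = PySem.List.dedup ((citations.getD [] ++ retrieved_content.map (fun item => (PySem.Dict.mk item).getD "source" "") ++ (web_results.getD []).map (fun item =>
        if ((PySem.Dict.mk item).getD "url" "" != "") = true then
          "[" ++ (PySem.Dict.mk item).getD "title" "" ++ "](" ++ (PySem.Dict.mk item).getD "url" "" ++ ")"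
        else (PySem.Dict.mk item).getD "title" "")).filter (fun s => s != "")) := by
  rw [← List.foldl_map (f := fun item => (PySem.Dict.mk item).getD "source" "") (g := fscStep),
      ← List.foldl_map (f := fun item =>
        if ((PySem.Dict.mk item).getD "url" "" != "") = true then
          "[" ++ (PySem.Dict.mk item).getD "title" "" ++ "](" ++ (PySem.Dict.mk item).getD "url" "" ++ ")"
        else (PySem.Dict.mk item).getD "title" "") (g := fscStep),
      ← List.foldl_append, ← List.foldl_append]
  rw [show (PySem.Set.empty, ([] : List String)) = (([] : List String), ([] : List String)) from rfl,
      fold_fscStep]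
  rw [PySem.List.dedup_eq_ofList, PySem.Set.ofList_eq_foldl]
  simp [List.append_assoc]

theorem ofList_filter (p : String → Bool) (xs : List String) :
    PySem.Set.ofList (xs.filter p) = (PySem.Set.ofList xs).filter p := by
  induction xs with
  | nil => simp [PySem.Set.ofList_nil]
  | cons x xs ih =>
    rw [PySem.Set.ofList_cons, PySem.Set.discard]
    by_cases hp : p x = true
    · rw [List.filter_cons_of_pos hp, PySem.Set.ofList_cons, PySem.Set.discard, ih,
          List.filter_cons_of_pos hp, List.filter_filter, List.filter_filter]
      exact congrArg (List.cons x) (List.filter_congr (fun a _ => Bool.and_comm _ _))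
    · rw [List.filter_cons_of_neg (by simp [hp]), ih,
          List.filter_cons_of_neg (by simp [hp]), List.filter_filter]
      refine (List.filter_congr ?_).symm
      intro a _
      by_cases hax : (a == x) = true
      · have : a = x := eq_of_beq hax
        subst this
        simp [hp]
      · simp [hax]

theorem nubLoop_spec : ∀ (n : Nat) (work : List String), work.length ≤ n →
    ∀ sources : List String, nubLoop sources work = sources ++ PySem.Set.ofList work := by
  intro n
  induction n with
  | zero =>
    intro work hlen sources
    have : work = [] := List.eq_nil_of_length_eq_zero (Nat.le_zero.mp hlen)
    subst this
    simp [nubLoop, PySem.Set.ofList_nil]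
  | succ n ih =>
    intro work hlen sources
    match work with
    | [] => simp [nubLoop, PySem.Set.ofList_nil]
    | head :: rest =>
      rw [nubLoop]
      have hfl : (rest.filter (fun y => y != head)).length ≤ n := by
        have := List.length_filter_le (fun y => y != head) rest
        simp only [List.length_cons] at hlen
        omega
      rw [ih _ hfl]
      rw [PySem.Set.ofList_cons, PySem.Set.discard, ← ofList_filter]
      have : (fun y => !(y == head)) = (fun y => y != head) := by
        funext y; simp [bne]
      rw [this]
      simp

theorem enumerate_map_ne_nil (D : List String) (hD : D ≠ []) :
    (PySem.List.enumerate D 1).map (fun p => PySem.Int.toStr p.1 ++ ". " ++ p.2) ≠ [] := by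
  obtain ⟨d, ds, rfl⟩ := List.exists_cons_of_ne_nil hD
  simp [PySem.List.enumerate]

theorem else_eq (S : List String) (mi : Int) (h0 : S ≠ []) :
    PySem.Str.join "\n"
      ((if mi > 0 ∧ (S.length : Int) > mi then
          (List.foldl (fun ls p => ls ++ [PySem.Int.toStr p.1 ++ ". " ++ p.2]) ["", "## Sources", ""]
            (PySem.List.enumerate (if mi > 0 then PySem.List.slice S none (some mi) else S) 1)) ++
          ["", "> *Showing " ++ (PySem.Int.toStr mi ++ " of " ++ PySem.Int.toStr (S.length : Int) ++ " sources; " ++ PySem.Int.toStr ((S.length : Int) - mi) ++ " more omitted.*")]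
        else
          List.foldl (fun ls p => ls ++ [PySem.Int.toStr p.1 ++ ". " ++ p.2]) ["", "## Sources", ""]
            (PySem.List.enumerate (if mi > 0 then PySem.List.slice S none (some mi) else S) 1)) ++ [""])
    = "\n## Sources\n\n" ++
        PySem.Str.join "\n" ((PySem.List.enumerate (if mi > 0 then PySem.List.slice S none (some mi) else S) 1).map (fun p => PySem.Int.toStr p.1 ++ ". " ++ p.2)) ++
        (if mi > 0 ∧ (S.length : Int) > mi then
          "\n\n> *Showing " ++ (PySem.Int.toStr mi ++ " of " ++ PySem.Int.toStr (S.length : Int) ++ " sources; " ++ PySem.Int.toStr ((S.length : Int) - mi) ++ " more omitted.*")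
        else "") ++ "\n" := by
  have hD : (if mi > 0 then PySem.List.slice S none (some mi) else S) ≠ [] := by
    split_ifs with hmi
    · rw [PySem.List.slice_to S (by omega)]
      intro hcontr
      rcases List.take_eq_nil_iff.mp hcontr with h | h
      · omega
      · exact h0 h
    · exact h0
  rw [PySem.List.foldl_append_singleton_eq_map]
  set L := (PySem.List.enumerate (if mi > 0 then PySem.List.slice S none (some mi) else S) 1).map (fun p => PySem.Int.toStr p.1 ++ ". " ++ p.2) with hLdef
  have hL : L ≠ [] := enumerate_map_ne_nil _ hD
  set m := PySem.Int.toStr mi ++ " of " ++ PySem.Int.toStr (S.length : Int) ++ " sources; " ++ PySem.Int.toStr ((S.length : Int) - mi) ++ " more omitted.*" with hmdef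
  by_cases hc : mi > 0 ∧ (S.length : Int) > mi
  · simp only [if_pos hc]
    rw [show ((["", "## Sources", ""] ++ L) ++ ["", "> *Showing " ++ m]) ++ [""] =
          "" :: "## Sources" :: "" :: (L ++ ["", "> *Showing " ++ m, ""]) by simp]
    rw [shape2 L ("> *Showing " ++ m) hL, note_merge]
  · simp only [if_neg hc]
    rw [show (["", "## Sources", ""] ++ L) ++ [""] = "" :: "## Sources" :: "" :: (L ++ [""]) by simp]
    rw [shape1 L hL]

theorem alt_sources_eq (retrieved_content : List (List (String × String))) (web_results : Option (List (List (String × String)))) (citations : Option (List String)) :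
    nubLoop []
      ((web_results.getD []).foldl (fun acc item =>
          if fscLabel item != "" then acc ++ [fscLabel item] else acc)
        ((citations.getD []).filter (fun s => s != "")
          ++ (retrieved_content.map (fun item => PySem.Dict.getD (PySem.Dict.mk item) "source" "")).filter (fun s => s != "")))
    = PySem.List.dedup ((citations.getD [] ++ retrieved_content.map (fun item => (PySem.Dict.mk item).getD "source" "") ++ (web_results.getD []).map fscLabel).filter (fun s => s != "")) := by
  rw [PySem.List.foldl_append_if (p := fun item => fscLabel item != "") (f := fscLabel)]
  rw [nubLoop_spec _ _ (Nat.le_refl _)]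
  rw [PySem.List.dedup_eq_ofList]
  simp only [List.nil_append, List.filter_append, List.filter_map]
  rfl

theorem ports_eq (retrieved_content : List (List (String × String))) (web_results : Option (List (List (String × String)))) (citations : Option (List String)) (max_items : Int) :
    format_source_citations retrieved_content web_results citations max_items = format_source_citations_alt retrieved_content web_results citations max_items := by
  simp only [format_source_citations, format_source_citations_alt]
  rw [alt_sources_eq]
  rw [show fscLabel = (fun item : List (String × String) =>
        if ((PySem.Dict.mk item).getD "url" "" != "") = true then
          "[" ++ (PySem.Dict.mk item).getD "title" "" ++ "](" ++ (PySem.Dict.mk item).getD "url" "" ++ ")"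
        else (PySem.Dict.mk item).getD "title" "") from rfl]
  rw [sources_eq]
  by_cases h0 : PySem.List.dedup ((citations.getD [] ++ retrieved_content.map (fun item => (PySem.Dict.mk item).getD "source" "") ++ (web_results.getD []).map (fun item =>
        if ((PySem.Dict.mk item).getD "url" "" != "") = true then
          "[" ++ (PySem.Dict.mk item).getD "title" "" ++ "](" ++ (PySem.Dict.mk item).getD "url" "" ++ ")"
        else (PySem.Dict.mk item).getD "title" "")).filter (fun s => s != "")) = []
  · simp only [if_pos h0]
  · simp only [if_neg h0]
    exact else_eq _ max_items h0

-- ===== VERDICT (by name: the statement is the Claim_ definition above) =====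
theorem format_source_citations_spec : Claim_equal_format_source_citations := by
  intro rc wr cit mi _
  unfold Spec_format_source_citations
  exact ports_eq rc wr cit mi
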